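-- pv_equiv track=rewrite | github.com/jdeantoni/pedagogicalWebServer | iiwServer.py | removeExtension
-- ===== SOURCE A (Python) =====
-- def getFileExtension(path: str) -> str:
--     '''Returns the exntesion of the file pointed by the path'''
--     # index: int = int(0)
--     # current: str = str("")
--     # while (index < len(path)):
--     #     if(path[index] == "."):
--     #         current = ""
--     #     else:
--     #         current = current + path[index]
--     #     index = index + 1
--     # return current
--     index: int = int(len(path)-1)
--     res: str = str("")
--     while (index >= 0):
--         if(path[index] == "."):
--             return res
--         else:
--             res = path[index] + res
--         index = index - 1
--     return ""
--
-- def removeExtension(filePath:str) -> str: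
--     fileExtension: str = getFileExtension(filePath)
--     i: int = int(0)
--     res: str = str()
--     while i < (len(filePath) - len(fileExtension) - 1):
--         res += filePath[i]
--         i += 1
--     return res
-- ===== SOURCE B (Python) =====
-- def removeExtension(filePath: str) -> str:
--     return filePath[:filePath.rfind('.')]
-- ===== Notes on version B (the rewrite author's own statement) =====
-- stated objective: idiomatic
-- what changed: Replaced the two hand-written char-by-char while loops (extension scan from the end plus prefix copy loop, each building the result by repeated string concatenation) with a single rfind('.')+slice expression, relying on rfind's -1 giving the same drop-last-character slice when no dot is present.
import Mathlib
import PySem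

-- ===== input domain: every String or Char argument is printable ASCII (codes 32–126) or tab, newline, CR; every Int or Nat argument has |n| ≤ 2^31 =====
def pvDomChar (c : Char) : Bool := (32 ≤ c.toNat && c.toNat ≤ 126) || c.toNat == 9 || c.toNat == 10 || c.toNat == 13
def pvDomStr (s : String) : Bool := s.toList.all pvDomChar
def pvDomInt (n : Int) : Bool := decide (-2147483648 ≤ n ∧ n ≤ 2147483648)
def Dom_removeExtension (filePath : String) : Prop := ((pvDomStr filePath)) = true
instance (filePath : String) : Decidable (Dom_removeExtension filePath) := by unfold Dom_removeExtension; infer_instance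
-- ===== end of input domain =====

-- B replaces A's two hand-written index loops (extension scan + prefix copy) by a single
-- rfind('.') + slice expression (objective: idiomatic/simpler; same behaviour, including
-- the [:-1] effect when no dot is present).

-- ===== PORT A =====
-- getFileExtension's while-loop from the end of the string: recursion over the reversed char list
def pvExtLoop : List Char → List Char → List Char
  | [], _ => []
  | c :: rest, res => if c = '.' then res else pvExtLoop rest (c :: res)

-- removeExtension's copy loop: i counts up while i < bound, appending filePath[i]
def pvCopyLoop : List Char → Int → Int → List Char
  | [], _, _ => []
  | c :: rest, i, bound => if i < bound then c :: pvCopyLoop rest (i + 1) bound else []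

def removeExtension (filePath : String) : String :=
  let cs := filePath.toList
  let fileExtension := pvExtLoop cs.reverse []
  String.ofList (pvCopyLoop cs 0 ((cs.length : Int) - fileExtension.length - 1))

-- ===== PORT B =====
def removeExtension_alt (filePath : String) : String :=
  PySem.Str.slice filePath none (some (PySem.Str.rfind filePath "."))

-- ===== PRECONDITION & SPEC =====
def Spec_removeExtension (filePath : String) (out : String) : Prop := out = removeExtension_alt filePath
instance (filePath : String) (out : String) : Decidable (Spec_removeExtension filePath out) := by unfold Spec_removeExtension; infer_instance

-- ===== CLAIM (what is proved, stated in full; the proofs are below) =====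
def Claim_equal_removeExtension : Prop := ∀ (filePath : String), Dom_removeExtension filePath → Spec_removeExtension filePath (removeExtension filePath)

-- ===== LEMMAS AND PROOFS =====

-- A's copy loop collects exactly the first (bound - i) characters
theorem pvCopyLoop_eq_take (cs : List Char) : ∀ i b : Int, pvCopyLoop cs i b = cs.take (b - i).toNat := by
  induction cs with
  | nil => intro i b; simp [pvCopyLoop]
  | cons c rest ih =>
    intro i b
    simp only [pvCopyLoop]
    split_ifs with h
    · have : (b - i).toNat = (b - (i + 1)).toNat + 1 := by omega
      rw [this, List.take_succ_cons, ih]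
    · have : (b - i).toNat = 0 := by omega
      simp [this]

-- A's extension loop: empty if no dot, else the reversed prefix of the reversed string up to the first dot
theorem pvExtLoop_eq (r : List Char) : ∀ acc, pvExtLoop r acc =
    if r.all (· ≠ '.') then ([] : List Char) else (r.takeWhile (· ≠ '.')).reverse ++ acc := by
  induction r with
  | nil => intro acc; simp [pvExtLoop]
  | cons c rest ih =>
    intro acc
    simp only [pvExtLoop]
    by_cases hc : c = '.'
    · simp [hc]
    · simp only [if_neg hc, ih, List.all_cons, List.takeWhile_cons]
      simp [hc]

theorem pvDropWhile_head_false {α : Type} (p : α → Bool) : ∀ (l : List α) c d, l.dropWhile p = c :: d → p c = false := by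
  intro l
  induction l with
  | nil => intro c d h; simp at h
  | cons a t ih =>
    intro c d h
    by_cases hp : p a
    · rw [List.dropWhile_cons_of_pos hp] at h; exact ih _ _ h
    · rw [List.dropWhile_cons_of_neg hp] at h
      cases h
      simpa using hp

-- rfind's worker returns the highest dot position r when cs[r] = '.' and no dot follows
theorem pvGo_last_dot (s : List Char) (r : Nat) (hr : s[r]? = some '.')
    (hafter : ∀ j, r < j → '.' ∉ s.drop j) :
    ∀ k, r ≤ k → PySem.Chars.rfind.go s ['.'] k = r := by
  have hpre : (['.'] : List Char).isPrefixOf (s.drop r) = true := by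
    rw [List.isPrefixOf_iff_prefix]
    have hlt : r < s.length := by
      by_contra hge
      rw [List.getElem?_eq_none (by omega)] at hr
      simp at hr
    rw [List.drop_eq_getElem_cons hlt]
    have hc : s[r] = '.' := by
      rw [List.getElem?_eq_getElem hlt] at hr
      exact Option.some.inj hr
    rw [hc]
    exact ⟨_, rfl⟩
  intro k
  induction k with
  | zero =>
    intro hk
    have h0 : r = 0 := by omega
    subst h0
    simp only [PySem.Chars.rfind.go]
    rw [if_pos (by simpa using hpre)]
    simp
  | succ j ih =>
    intro hk
    simp only [PySem.Chars.rfind.go]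
    by_cases he : r = j + 1
    · rw [if_pos (by rw [← he]; exact hpre)]
      omega
    · have hno : ¬ ((['.'] : List Char).isPrefixOf (s.drop (j + 1)) = true) := by
        rw [List.isPrefixOf_iff_prefix]
        intro hp
        exact hafter (j + 1) (by omega) (hp.subset (by simp))
      rw [if_neg hno]
      exact ih (by omega)

-- rfind's worker returns -1 when the string has no dot
theorem pvGo_no_dot (s : List Char) (h : '.' ∉ s) : ∀ k, PySem.Chars.rfind.go s ['.'] k = -1 := by
  intro k
  induction k with
  | zero =>
    simp only [PySem.Chars.rfind.go]
    rw [if_neg]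
    rw [List.isPrefixOf_iff_prefix]
    intro hp
    exact h (hp.subset (by simp))
  | succ j ih =>
    simp only [PySem.Chars.rfind.go]
    rw [if_neg, ih]
    rw [List.isPrefixOf_iff_prefix]
    intro hp
    exact h (List.mem_of_mem_drop (hp.subset (by simp)))

theorem pvMain (fp : String) : removeExtension fp = removeExtension_alt fp := by
  apply String.toList_inj.mp
  rw [show removeExtension fp = String.ofList (pvCopyLoop fp.toList 0
        ((fp.toList.length : Int) - (pvExtLoop fp.toList.reverse []).length - 1)) from rfl]
  unfold removeExtension_alt
  by_cases hdot : '.' ∈ fp.toList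
  · -- a dot exists: let t be the chars after the last dot (reversed), d.reverse the prefix before it
    have hnall : ¬ ∀ x ∈ fp.toList.reverse, (x ≠ '.') := by
      intro h; exact h '.' (by simpa using hdot) rfl
    obtain ⟨c, d, hd⟩ : ∃ c d, fp.toList.reverse.dropWhile (· ≠ '.') = c :: d := by
      cases h : fp.toList.reverse.dropWhile (· ≠ '.') with
      | nil =>
        rw [List.dropWhile_eq_nil_iff] at h
        exact absurd (by intro x hx; simpa using h x hx) hnall
      | cons c d => exact ⟨c, d, rfl⟩
    have hcdot : c = '.' := by simpa using pvDropWhile_head_false _ _ _ _ hd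
    subst hcdot
    set t := fp.toList.reverse.takeWhile (· ≠ '.') with ht
    have hsplit : fp.toList.reverse = t ++ '.' :: d := by
      rw [ht, ← hd, List.takeWhile_append_dropWhile]
    have hcs : fp.toList = d.reverse ++ '.' :: t.reverse := by
      have := congrArg List.reverse hsplit
      simpa using this
    have htno : ∀ x ∈ t, x ≠ '.' := by
      intro x hx
      have := List.mem_takeWhile_imp hx
      simpa using this
    have hext : pvExtLoop fp.toList.reverse [] = t.reverse := by
      rw [pvExtLoop_eq, if_neg (by simpa using hnall), ← ht, List.append_nil]
    have hlen : fp.toList.length = d.length + 1 + t.length := by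
      rw [hcs]; simp; omega
    have hA : pvCopyLoop fp.toList 0 ((fp.toList.length : Int) - (pvExtLoop fp.toList.reverse []).length - 1)
        = fp.toList.take d.length := by
      rw [pvCopyLoop_eq_take, hext]
      congr 1
      simp only [List.length_reverse]
      omega
    have hget : fp.toList[d.length]? = some '.' := by
      rw [hcs]
      rw [List.getElem?_append_right (by simp)]
      simp
    have hafter : ∀ j, d.length < j → '.' ∉ fp.toList.drop j := by
      intro j hj hmem
      rw [hcs, List.drop_append,
          List.drop_eq_nil_of_le (by simp; omega), List.nil_append] at hmem
      have hk : j - d.reverse.length = (j - d.length - 1) + 1 := by simp; omega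
      rw [hk, List.drop_succ_cons] at hmem
      exact htno '.' (by simpa using List.mem_of_mem_drop hmem) rfl
    have hrfs : PySem.Str.rfind fp "." = (d.length : Int) := by
      have : PySem.Str.rfind fp "." = PySem.Chars.rfind.go fp.toList ['.'] fp.toList.length := rfl
      rw [this]
      exact pvGo_last_dot _ _ hget hafter _ (by omega)
    rw [hA, hrfs]
    simp only [PySem.Str.toList_slice, PySem.Chars.slice_eq_listSlice]
    rw [PySem.List.slice_to fp.toList (b := (d.length : Int)) (by omega)]
    simp
  · -- no dot: A copies all but the last character; rfind = -1 gives the same slice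
    have hall : ∀ x ∈ fp.toList.reverse, (x ≠ '.') := by
      intro x hx h; subst h; exact hdot (by simpa using hx)
    have hext : pvExtLoop fp.toList.reverse [] = [] := by
      rw [pvExtLoop_eq, if_pos (by simpa using hall)]
    have hA : pvCopyLoop fp.toList 0 ((fp.toList.length : Int) - (pvExtLoop fp.toList.reverse []).length - 1)
        = fp.toList.dropLast := by
      rw [pvCopyLoop_eq_take, hext, List.dropLast_eq_take]
      congr 1
      simp only [List.length_nil]
      omega
    have hrf : PySem.Str.rfind fp "." = -1 := by
      have : PySem.Str.rfind fp "." = PySem.Chars.rfind.go fp.toList ['.'] fp.toList.length := rfl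
      rw [this]
      exact pvGo_no_dot _ hdot _
    rw [hA, hrf, PySem.Str.slice_to_neg_one]
    simp

-- ===== VERDICT (by name: the statement is the Claim_ definition above) =====
theorem removeExtension_spec : Claim_equal_removeExtension := by
  intro fp _
  unfold Spec_removeExtension
  exact pvMain fp
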